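-- pv_equiv track=rewrite | github.com/KostasEreksonas/Codewars-kata-solutions | 7kyu/Python/Find_the_middle_element.py | gimme
-- ===== SOURCE A (Python) =====
-- def gimme(input_array):
--     tmp = []
--     for x in input_array:
--         tmp.append(x)
--     tmp.sort()
--     for x in range(len(tmp)):
--         if input_array[x] == tmp[1]:
--             return x
-- ===== SOURCE B (Python) =====
-- def gimme(input_array):
--     # One-pass selection of the two smallest values, then locate the
--     # second-smallest in the original array.
--     m1, m2 = input_array[0], input_array[1]
--     if m2 < m1:
--         m1, m2 = m2, m1
--     for x in input_array[2:]:
--         if x < m1: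
--             m1, m2 = x, m1
--         elif x < m2:
--             m2 = x
--     return input_array.index(m2)
-- ===== Notes on version B (the rewrite author's own statement) =====
-- stated objective: faster
-- what changed: Replaces copy-then-full-sort with a single-pass selection of the two smallest values, then one first-index lookup in the original array instead of an index-by-index scan against the sorted copy.
-- outside the precondition, e.g. on gimme([]): A returns None, B raises IndexError; on gimme([1]): A raises IndexError, B raises IndexError
import Mathlib
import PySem

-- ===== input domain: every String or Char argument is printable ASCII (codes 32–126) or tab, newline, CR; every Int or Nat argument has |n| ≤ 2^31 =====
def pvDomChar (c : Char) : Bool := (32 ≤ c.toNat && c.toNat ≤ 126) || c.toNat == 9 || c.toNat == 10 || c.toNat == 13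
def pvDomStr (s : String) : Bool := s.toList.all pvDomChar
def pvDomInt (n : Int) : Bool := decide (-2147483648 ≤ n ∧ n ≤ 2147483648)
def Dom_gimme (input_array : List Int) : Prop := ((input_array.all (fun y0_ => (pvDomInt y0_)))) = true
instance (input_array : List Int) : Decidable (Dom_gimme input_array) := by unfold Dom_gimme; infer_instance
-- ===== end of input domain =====

-- B replaces A's copy-then-sort with a one-pass selection of the two smallest
-- values followed by a single first-index lookup in the original array.


-- ===== PORT A =====
-- the 'for x in range(len(tmp)): if input_array[x] == tmp[1]: return x' loop;
-- none when the loop falls through (Python returns None there — outside Pre_).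
def gimmeFind (input_array tmp : List Int) : List Int → Option Int
  | [] => none
  | x :: rest =>
      if PySem.List.pyGet? input_array x = PySem.List.pyGet? tmp 1 then some x
      else gimmeFind input_array tmp rest

def gimme (input_array : List Int) : Int :=
  let tmp := input_array.foldl (fun acc x => acc ++ [x]) []
  let tmp := PySem.List.sorted tmp id false
  (gimmeFind input_array tmp (PySem.List.pyRange 0 (tmp.length) 1)).getD 0

-- ===== PORT B =====
def gimmeStep (p : Int × Int) (x : Int) : Int × Int :=
  if x < p.1 then (x, p.1) else if x < p.2 then (p.1, x) else p

def gimme_alt (input_array : List Int) : Int :=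
  match PySem.List.pyGet? input_array 0, PySem.List.pyGet? input_array 1 with
  | some a, some b =>
      let p0 : Int × Int := if b < a then (b, a) else (a, b)
      let p := (PySem.List.slice input_array (some 2) none).foldl gimmeStep p0
      match PySem.List.index? input_array p.2 with
      | some k => (k : Int)
      | none => 0   -- unreachable: p.2 is an element of input_array
  | _, _ => 0       -- len < 2: outside Pre_ (Python raises IndexError)

-- ===== PRECONDITION & SPEC =====
-- Pre_ excludes lists of length < 2: on [] A's final loop never runs and A
-- returns None (not an Int); on a singleton A raises IndexError at tmp[1].
def Pre_gimme (input_array : List Int) : Prop := 2 ≤ input_array.length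
instance (input_array : List Int) : Decidable (Pre_gimme input_array) := by
  unfold Pre_gimme; infer_instance
def pvWitness_gimme : List Int := [3, 1, 2]

def Spec_gimme (input_array : List Int) (out : Int) : Prop := out = gimme_alt input_array
instance (input_array : List Int) (out : Int) : Decidable (Spec_gimme input_array out) := by
  unfold Spec_gimme; infer_instance

-- ===== CLAIM (what is proved, stated in full; the proofs are below) =====
def Claim_equal_gimme : Prop := ∀ (input_array : List Int), Dom_gimme input_array → Pre_gimme input_array → Spec_gimme input_array (gimme input_array)

-- ===== LEMMAS AND PROOFS =====

lemma foldl_append_id (l acc : List Int) :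
    l.foldl (fun acc x => acc ++ [x]) acc = acc ++ l := by
  induction l generalizing acc with
  | nil => simp
  | cons x t ih => simp [List.foldl, ih]

lemma perm_rot3 (a b c : Int) (l : List Int) : (a :: b :: c :: l).Perm (c :: a :: b :: l) :=
  (List.Perm.cons a (List.Perm.swap c b l)).trans (List.Perm.swap c a (b :: l))

lemma pyGet_one_cons (x y : Int) (l : List Int) :
    PySem.List.pyGet? (x :: y :: l) 1 = some y := by
  exact PySem.List.pyGet?_ofNat (xs := x :: y :: l) (n := 1) (by simp)

-- the fold keeps (m1, m2) = the two smallest (in order) of everything seen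
lemma fold_two_smallest (t : List Int) :
    ∀ m1 m2 : Int, m1 ≤ m2 →
      ∃ rest : List Int,
        (t.foldl gimmeStep (m1, m2)).1 ≤ (t.foldl gimmeStep (m1, m2)).2 ∧
        (t.foldl gimmeStep (m1, m2)).2 ≤ m2 ∧
        ((t.foldl gimmeStep (m1, m2)).1 :: (t.foldl gimmeStep (m1, m2)).2 :: rest).Perm
          (m1 :: m2 :: t) ∧
        ∀ y ∈ rest, (t.foldl gimmeStep (m1, m2)).2 ≤ y := by
  induction t with
  | nil => intro m1 m2 h; exact ⟨[], h, le_refl _, List.Perm.refl _, by simp⟩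
  | cons x t ih =>
    intro m1 m2 h
    simp only [List.foldl_cons]
    by_cases h1 : x < m1
    · have hstep : gimmeStep (m1, m2) x = (x, m1) := by simp [gimmeStep, h1]
      rw [hstep]
      obtain ⟨rest, hle, hle2, hperm, hrest⟩ := ih x m1 (le_of_lt h1)
      refine ⟨m2 :: rest, hle, by omega, ?_, ?_⟩
      · exact ((perm_rot3 _ _ m2 rest).trans (List.Perm.cons m2 hperm)).trans
          (perm_rot3 m2 x m1 t)
      · intro y hy
        rcases List.mem_cons.mp hy with rfl | hy
        · omega
        · exact hrest y hy
    · by_cases h2 : x < m2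
      · have hstep : gimmeStep (m1, m2) x = (m1, x) := by simp [gimmeStep, h1, h2]
        rw [hstep]
        obtain ⟨rest, hle, hle2, hperm, hrest⟩ := ih m1 x (by omega)
        refine ⟨m2 :: rest, hle, by omega, ?_, ?_⟩
        · exact ((perm_rot3 _ _ m2 rest).trans (List.Perm.cons m2 hperm)).trans
            (List.Perm.swap m1 m2 (x :: t))
        · intro y hy
          rcases List.mem_cons.mp hy with rfl | hy
          · omega
          · exact hrest y hy
      · have hstep : gimmeStep (m1, m2) x = (m1, m2) := by simp [gimmeStep, h1, h2]
        rw [hstep]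
        obtain ⟨rest, hle, hle2, hperm, hrest⟩ := ih m1 m2 h
        refine ⟨x :: rest, hle, hle2, ?_, ?_⟩
        · exact ((perm_rot3 _ _ x rest).trans (List.Perm.cons x hperm)).trans
            (perm_rot3 m1 m2 x t).symm
        · intro y hy
          rcases List.mem_cons.mp hy with rfl | hy
          · omega
          · exact hrest y hy

-- a sorted permutation of x :: y :: rest with x ≤ y ≤ rest has second element y
lemma second_of_sorted {s0 s1 : Int} {s' : List Int}
    {x y : Int} {rest : List Int}
    (hpair : (s0 :: s1 :: s').Pairwise (fun a b => a ≤ b))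
    (hperm : (s0 :: s1 :: s').Perm (x :: y :: rest))
    (hxy : x ≤ y) (hrest : ∀ z ∈ rest, y ≤ z) : s1 = y := by
  have hmono0 : ∀ z ∈ s0 :: s1 :: s', s0 ≤ z := by
    intro z hz
    rcases List.mem_cons.mp hz with rfl | hz
    · exact le_refl _
    · exact (List.pairwise_cons.mp hpair).1 z hz
  have hxmin : ∀ z ∈ x :: y :: rest, x ≤ z := by
    intro z hz
    rcases List.mem_cons.mp hz with rfl | hz
    · exact le_refl _
    · rcases List.mem_cons.mp hz with rfl | hz
      · exact hxy
      · exact le_trans hxy (hrest z hz)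
  have h0x : s0 = x := by
    have hA : s0 ≤ x := hmono0 x (hperm.mem_iff.mpr (by simp))
    have hB : x ≤ s0 := hxmin s0 (hperm.mem_iff.mp (by simp))
    omega
  subst h0x
  have hperm' : (s1 :: s').Perm (y :: rest) := hperm.cons_inv
  have hpair' : (s1 :: s').Pairwise (fun a b => a ≤ b) := (List.pairwise_cons.mp hpair).2
  have h1 : s1 ≤ y := by
    have := hperm'.mem_iff.mpr (by simp : y ∈ y :: rest)
    rcases List.mem_cons.mp this with rfl | hz
    · exact le_refl _
    · exact (List.pairwise_cons.mp hpair').1 y hz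
  have h2 : y ≤ s1 := by
    have := hperm'.mem_iff.mp (by simp : s1 ∈ s1 :: s')
    rcases List.mem_cons.mp this with rfl | hz
    · exact le_refl _
    · exact hrest s1 hz
  omega

-- A's range scan returns the first index whose element equals v (when tmp[1] = some v)
lemma gimmeFind_eq_index? (tmp : List Int) (v : Int)
    (hv : PySem.List.pyGet? tmp 1 = some v) :
    ∀ (l : List Int) (k : Nat) (pre : List Int), pre.length = k →
      gimmeFind (pre ++ l) tmp (PySem.List.pyRange (k : Int) ((pre ++ l).length : Int) 1) =
        (PySem.List.index? l v).map (fun j => ((k + j : Nat) : Int)) := by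
  intro l
  induction l with
  | nil =>
    intro k pre hk
    rw [PySem.List.pyRange_one_eq_nil (by simp [hk])]
    simp [gimmeFind, PySem.List.index?]
  | cons x t ih =>
    intro k pre hk
    have hlen : pre.length < (pre ++ x :: t).length := by simp
    have hlt : (k : Int) < ((pre ++ x :: t).length : Int) := by omega
    rw [PySem.List.pyRange_one_cons hlt]
    have hget : PySem.List.pyGet? (pre ++ x :: t) (k : Int) = some x := by
      rw [← hk]; exact PySem.List.pyGet?_append_length pre t x
    by_cases hx : x = v
    · subst hx
      rw [gimmeFind]
      rw [if_pos (hget.trans hv.symm)]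
      rw [PySem.List.index?_cons_self]
      simp
    · have hne : ¬ (PySem.List.pyGet? (pre ++ x :: t) (k : Int) = PySem.List.pyGet? tmp 1) := by
        rw [hget, hv]; simp [hx]
      have hstep : ((k : Int) + 1) = ((k + 1 : Nat) : Int) := by push_cast; ring
      have happ : pre ++ x :: t = (pre ++ [x]) ++ t := by simp
      have hih := ih (k + 1) (pre ++ [x]) (by simp [hk])
      rw [← happ] at hih
      rw [gimmeFind, if_neg hne, hstep, hih, PySem.List.index?_cons_of_ne t hx]
      cases PySem.List.index? t v with
      | none => simp
      | some j => simp; omega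

theorem gimme_eq (a b : Int) (t : List Int) : gimme (a :: b :: t) = gimme_alt (a :: b :: t) := by
  have hg0 : PySem.List.pyGet? (a :: b :: t) 0 = some a := PySem.List.pyGet?_zero_cons a _
  have hg1 : PySem.List.pyGet? (a :: b :: t) 1 = some b := pyGet_one_cons a b t
  have hslice : PySem.List.slice (a :: b :: t) (some 2) none = t := by
    rw [PySem.List.slice_from (a :: b :: t) (by norm_num : (0 : Int) ≤ 2)]
    simp
  -- the two-smallest fold (B's loop)
  have hinit : (if b < a then ((b, a) : Int × Int) else (a, b)).1 ≤
      (if b < a then ((b, a) : Int × Int) else (a, b)).2 := by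
    split_ifs with hba <;> dsimp only <;> omega
  obtain ⟨rest, hle, -, hperm, hrest⟩ :=
    fold_two_smallest t _ _ hinit
  set p := t.foldl gimmeStep (if b < a then ((b, a) : Int × Int) else (a, b)) with hp
  have hperm2 : (p.1 :: p.2 :: rest).Perm (a :: b :: t) := by
    by_cases hba : b < a
    · rw [if_pos hba] at hperm
      exact hperm.trans (List.Perm.swap a b t)
    · rw [if_neg hba] at hperm
      exact hperm
  -- A's sorted copy
  have htmp : (a :: b :: t).foldl (fun acc x => acc ++ [x]) [] = a :: b :: t := by
    exact foldl_append_id (a :: b :: t) []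
  have hsperm := PySem.List.sorted_perm (a :: b :: t) id false
  obtain ⟨s0, s1, s', hsm⟩ : ∃ s0 s1 s',
      PySem.List.sorted (a :: b :: t) id false = s0 :: s1 :: s' := by
    have hlen := hsperm.length_eq
    cases hE : PySem.List.sorted (a :: b :: t) id false with
    | nil => rw [hE] at hlen; simp at hlen
    | cons s0 r =>
      cases r with
      | nil => rw [hE] at hlen; simp at hlen
      | cons s1 s' => exact ⟨s0, s1, s', rfl⟩
  have hpair : (s0 :: s1 :: s').Pairwise (fun a b => a ≤ b) := by
    have := PySem.List.sorted_pairwise (a :: b :: t) id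
    rw [hsm] at this
    simpa using this
  have hs1 : s1 = p.2 := by
    refine second_of_sorted hpair ?_ hle hrest
    exact (hsm ▸ hsperm).trans hperm2.symm
  have hgets : PySem.List.pyGet? (s0 :: s1 :: s') 1 = some p.2 := by
    rw [← hs1]; exact pyGet_one_cons s0 s1 s'
  have hmem : p.2 ∈ a :: b :: t := hperm2.mem_iff.mp (by simp)
  have hfind := gimmeFind_eq_index? (s0 :: s1 :: s') p.2 hgets (a :: b :: t) 0 [] rfl
  simp only [List.nil_append, Nat.cast_zero] at hfind
  have hleneq : (s0 :: s1 :: s').length = (a :: b :: t).length := by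
    rw [← hsm]; exact hsperm.length_eq
  simp only [gimme, gimme_alt, htmp, hsm, hg0, hg1, hslice, hleneq, ← hp]
  rw [hfind]
  cases hcase : PySem.List.index? (a :: b :: t) p.2 with
  | none => exact absurd ((PySem.List.index?_eq_none_iff _ _).mp hcase) (by simp [hmem])
  | some j => simp

-- ===== VERDICT (by name: the statement is the Claim_ definition above) =====
theorem gimme_spec : Claim_equal_gimme := by
  intro l _ hpre
  unfold Pre_gimme at hpre
  unfold Spec_gimme
  rcases l with _ | ⟨a, _ | ⟨b, t⟩⟩
  · simp at hpre
  · simp at hpre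
  · exact gimme_eq a b t
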